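-- pv_equiv track=rewrite | github.com/akashvijay98/Custom_RAG_Bot | test.py | maxCardCount
-- ===== SOURCE A (Python) =====
-- def maxCardCount(n, card):
--     # dp[power] = max_cards_count
--     dp = {0: 0}
--
--     for c in card:
--         # Create a copy to represent the "Skip" choice for all existing states
--         new_dp = dp.copy()
--
--         for power, count in dp.items():
--             # Try the "Take" choice
--             if power + c >= 0:
--                 new_power = power + c
--                 new_count = count + 1
--                 # Update if this path gives more cards for the same power
--                 if new_power not in new_dp or new_count > new_dp[new_power]:
--                     new_dp[new_power] = new_count
--
--         dp = new_dp
--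
--     return max(dp.values())
-- ===== SOURCE B (Python) =====
-- def maxCardCount(n, card):
--     # Top-down recursion on the card list: best(power, cards) = the maximum
--     # number of cards takeable from `cards` when the running power is `power`.
--     def best(power, cards):
--         if not cards:
--             return 0
--         c = cards[0]
--         rest = cards[1:]
--         skip = best(power, rest)
--         if power + c >= 0:
--             return max(skip, 1 + best(power + c, rest))
--         return skip
--     return best(0, card)
-- ===== Notes on version B (the rewrite author's own statement) =====
-- stated objective: alternative
-- what changed: Replaces A's bottom-up dictionary DP (a power->max-count table rebuilt per card) by a direct top-down take/skip recursion over the card list.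
import Mathlib
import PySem

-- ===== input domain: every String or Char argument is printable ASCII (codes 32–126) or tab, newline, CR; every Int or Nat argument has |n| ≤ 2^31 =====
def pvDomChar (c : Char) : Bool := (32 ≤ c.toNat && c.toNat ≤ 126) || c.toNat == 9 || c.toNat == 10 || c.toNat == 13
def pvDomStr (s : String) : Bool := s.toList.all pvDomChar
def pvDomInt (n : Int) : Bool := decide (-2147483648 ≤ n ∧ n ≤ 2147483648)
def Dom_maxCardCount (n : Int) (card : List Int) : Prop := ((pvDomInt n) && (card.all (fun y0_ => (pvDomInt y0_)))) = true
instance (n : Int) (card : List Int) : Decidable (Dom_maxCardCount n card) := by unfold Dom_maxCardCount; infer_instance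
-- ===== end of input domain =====

-- B replaces A's bottom-up power→max-count dictionary DP by a direct top-down
-- take/skip recursion over the card list (alternative decomposition, not faster).

-- ===== PORT A =====
-- inner-loop body of A: one item (power, count) of the old dp applied to new_dp
def pvStepA (c : Int) (nd : PySem.Dict Int Int) (pc : Int × Int) : PySem.Dict Int Int :=
  if 0 ≤ pc.1 + c then
    match nd.get? (pc.1 + c) with
    | none => nd.insert (pc.1 + c) (pc.2 + 1)
    | some v => if pc.2 + 1 > v then nd.insert (pc.1 + c) (pc.2 + 1) else nd
  else nd

def maxCardCount (n : Int) (card : List Int) : Int :=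
  let dp := card.foldl (fun dp c => dp.items.foldl (pvStepA c) dp)
              (PySem.Dict.ofList [((0 : Int), (0 : Int))])
  match PySem.List.max? dp.values (fun x => x) with
  | some m => m
  | none => 0   -- unreachable: dp always holds the key 0 (Python's max would raise only on empty)

-- ===== PORT B =====
def pvBest : Int → List Int → Int
  | _, [] => 0
  | p, c :: rest =>
    let skip := pvBest p rest
    if 0 ≤ p + c then max skip (1 + pvBest (p + c) rest) else skip

def maxCardCount_alt (n : Int) (card : List Int) : Int := pvBest 0 card

-- ===== PRECONDITION & SPEC =====
def Spec_maxCardCount (n : Int) (card : List Int) (out : Int) : Prop := out = maxCardCount_alt n card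
instance (n : Int) (card : List Int) (out : Int) : Decidable (Spec_maxCardCount n card out) := by unfold Spec_maxCardCount; infer_instance

-- ===== CLAIM (what is proved, stated in full; the proofs are below) =====
def Claim_equal_maxCardCount : Prop := ∀ (n : Int) (card : List Int), Dom_maxCardCount n card → Spec_maxCardCount n card (maxCardCount n card)

-- ===== LEMMAS AND PROOFS =====

-- contribution of a dp entry (power, count): count + best continuation from that power
def pvContrib (cards : List Int) (pc : Int × Int) : Int := pc.2 + pvBest pc.1 cards

lemma pvBest_cons (p c : Int) (r : List Int) :
    pvBest p (c :: r) = if 0 ≤ p + c then max (pvBest p r) (1 + pvBest (p + c) r) else pvBest p r := by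
  simp [pvBest]

lemma pvBest_le_cons (p c : Int) (r : List Int) : pvBest p r ≤ pvBest p (c :: r) := by
  rw [pvBest_cons]; split_ifs with h
  · exact le_max_left _ _
  · exact le_refl _

lemma pvBest_take_le (p c : Int) (r : List Int) (h : 0 ≤ p + c) :
    1 + pvBest (p + c) r ≤ pvBest p (c :: r) := by
  rw [pvBest_cons]; simp [h]

lemma pvStepA_neg (c : Int) (nd : PySem.Dict Int Int) (pc : Int × Int)
    (h0 : ¬ 0 ≤ pc.1 + c) : pvStepA c nd pc = nd := by
  unfold pvStepA; rw [if_neg h0]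

lemma pvStepA_pos_none (c : Int) (nd : PySem.Dict Int Int) (pc : Int × Int)
    (h0 : 0 ≤ pc.1 + c) (h : nd.get? (pc.1 + c) = none) :
    pvStepA c nd pc = nd.insert (pc.1 + c) (pc.2 + 1) := by
  unfold pvStepA; rw [if_pos h0, h]

lemma pvStepA_pos_some (c : Int) (nd : PySem.Dict Int Int) (pc : Int × Int) (v : Int)
    (h0 : 0 ≤ pc.1 + c) (h : nd.get? (pc.1 + c) = some v) :
    pvStepA c nd pc = if pc.2 + 1 > v then nd.insert (pc.1 + c) (pc.2 + 1) else nd := by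
  unfold pvStepA; rw [if_pos h0, h]

lemma pvStepA_eq_or (c : Int) (nd : PySem.Dict Int Int) (pc : Int × Int) :
    pvStepA c nd pc = nd ∨
      (0 ≤ pc.1 + c ∧ pvStepA c nd pc = nd.insert (pc.1 + c) (pc.2 + 1)) := by
  by_cases h0 : 0 ≤ pc.1 + c
  · cases hg : nd.get? (pc.1 + c) with
    | none => exact Or.inr ⟨h0, pvStepA_pos_none c nd pc h0 hg⟩
    | some v =>
      rw [pvStepA_pos_some c nd pc v h0 hg]
      by_cases hv : pc.2 + 1 > v
      · rw [if_pos hv]; exact Or.inr ⟨h0, rfl⟩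
      · rw [if_neg hv]; exact Or.inl rfl
  · exact Or.inl (pvStepA_neg c nd pc h0)

lemma pvFoldA_nodup (c : Int) (l : List (Int × Int)) :
    ∀ nd : PySem.Dict Int Int, nd.keys.Nodup → (l.foldl (pvStepA c) nd).keys.Nodup := by
  induction l with
  | nil => intro nd h; exact h
  | cons pc l ih =>
    intro nd h
    apply ih
    rcases pvStepA_eq_or c nd pc with he | ⟨_, he⟩ <;> rw [he]
    · exact h
    · exact PySem.Dict.nodup_keys_insert _ _ _ h

lemma pvInsert_items_ne_nil (nd : PySem.Dict Int Int) (k v : Int) :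
    (nd.insert k v).items ≠ [] := by
  rw [PySem.Dict.items_insert]
  split_ifs with h
  · intro hmap
    rw [List.map_eq_nil_iff] at hmap
    rw [PySem.Dict.contains_eq_decide_mem_keys] at h
    simp only [decide_eq_true_eq] at h
    have : nd.keys = [] := by
      simp only [PySem.Dict.keys, hmap, List.map_nil]
    rw [this] at h; exact absurd h (List.not_mem_nil)
  · exact List.append_ne_nil_of_right_ne_nil _ (by simp)

lemma pvFoldA_ne_nil (c : Int) (l : List (Int × Int)) :
    ∀ nd : PySem.Dict Int Int, nd.items ≠ [] → (l.foldl (pvStepA c) nd).items ≠ [] := by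
  induction l with
  | nil => intro nd h; exact h
  | cons pc l ih =>
    intro nd h
    apply ih
    rcases pvStepA_eq_or c nd pc with he | ⟨_, he⟩ <;> rw [he]
    · exact h
    · exact pvInsert_items_ne_nil _ _ _

lemma pvStepA_get_mono (c : Int) (nd : PySem.Dict Int Int) (pc : Int × Int) {k v : Int}
    (h : nd.get? k = some v) :
    ∃ v', v ≤ v' ∧ (pvStepA c nd pc).get? k = some v' := by
  rcases pvStepA_eq_or c nd pc with he | ⟨h0, he⟩ <;> rw [he]
  · exact ⟨v, le_refl v, h⟩
  · by_cases hk : k = pc.1 + c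
    · subst hk
      rw [PySem.Dict.get?_insert_self]
      refine ⟨pc.2 + 1, ?_, rfl⟩
      by_cases hv : pc.2 + 1 > v
      · omega
      · -- then A's inner `if` did not fire, so the step returned nd; but he says it inserted:
        -- the two dicts agree, hence the stored value v already equals pc.2 + 1
        have hne : nd.insert (pc.1 + c) (pc.2 + 1) = nd := by
          rw [← he, pvStepA_pos_some c nd pc v h0 h, if_neg hv]
        have h2 : (nd.insert (pc.1 + c) (pc.2 + 1)).get? (pc.1 + c) = nd.get? (pc.1 + c) := by
          rw [hne]
        rw [PySem.Dict.get?_insert_self, h] at h2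
        injection h2 with h3
        omega
    · rw [PySem.Dict.get?_insert_of_ne _ _ hk, h]
      exact ⟨v, le_refl v, rfl⟩

lemma pvFoldA_get_mono (c : Int) (l : List (Int × Int)) :
    ∀ (nd : PySem.Dict Int Int) (k v : Int), nd.get? k = some v →
      ∃ v', v ≤ v' ∧ (l.foldl (pvStepA c) nd).get? k = some v' := by
  induction l with
  | nil => intro nd k v h; exact ⟨v, le_refl v, h⟩
  | cons pc l ih =>
    intro nd k v h
    obtain ⟨v1, hv1, h1⟩ := pvStepA_get_mono c nd pc h
    obtain ⟨v2, hv2, h2⟩ := ih (pvStepA c nd pc) k v1 h1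
    exact ⟨v2, le_trans hv1 hv2, h2⟩

lemma pvStepA_get_self (c : Int) (nd : PySem.Dict Int Int) (pc : Int × Int)
    (h0 : 0 ≤ pc.1 + c) :
    ∃ v', pc.2 + 1 ≤ v' ∧ (pvStepA c nd pc).get? (pc.1 + c) = some v' := by
  cases hg : nd.get? (pc.1 + c) with
  | none =>
    rw [pvStepA_pos_none c nd pc h0 hg]
    exact ⟨pc.2 + 1, le_refl _, PySem.Dict.get?_insert_self _ _ _⟩
  | some v =>
    rw [pvStepA_pos_some c nd pc v h0 hg]
    by_cases hv : pc.2 + 1 > v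
    · rw [if_pos hv]
      exact ⟨pc.2 + 1, le_refl _, PySem.Dict.get?_insert_self _ _ _⟩
    · rw [if_neg hv]
      exact ⟨v, by omega, hg⟩

lemma pvFoldA_get_after (c : Int) (l : List (Int × Int)) :
    ∀ (nd : PySem.Dict Int Int) (pc : Int × Int), pc ∈ l → 0 ≤ pc.1 + c →
      ∃ v', pc.2 + 1 ≤ v' ∧ (l.foldl (pvStepA c) nd).get? (pc.1 + c) = some v' := by
  induction l with
  | nil => intro _ _ h; exact absurd h (List.not_mem_nil)
  | cons q l ih =>
    intro nd pc hmem h0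
    rcases List.mem_cons.mp hmem with heq | hmem'
    · subst heq
      obtain ⟨v1, hv1, h1⟩ := pvStepA_get_self c nd pc h0
      obtain ⟨v2, hv2, h2⟩ := pvFoldA_get_mono c l (pvStepA c nd pc) _ _ h1
      exact ⟨v2, le_trans hv1 hv2, h2⟩
    · exact ih (pvStepA c nd q) pc hmem' h0

lemma pvFoldA_mem (c : Int) (l : List (Int × Int)) :
    ∀ (nd : PySem.Dict Int Int) (e : Int × Int), e ∈ (l.foldl (pvStepA c) nd).items →
      e ∈ nd.items ∨ ∃ pc ∈ l, 0 ≤ pc.1 + c ∧ e = (pc.1 + c, pc.2 + 1) := by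
  induction l with
  | nil => intro nd e h; exact Or.inl h
  | cons pc l ih =>
    intro nd e h
    rcases ih (pvStepA c nd pc) e h with h1 | ⟨q, hq, h0, he⟩
    · rcases pvStepA_eq_or c nd pc with hs | ⟨h0, hs⟩
      · rw [hs] at h1; exact Or.inl h1
      · rw [hs] at h1
        rcases (PySem.Dict.mem_items_insert _ _ _ _).mp h1 with he | ⟨hmem, _⟩
        · exact Or.inr ⟨pc, List.mem_cons_self, h0, he⟩
        · exact Or.inl hmem
    · exact Or.inr ⟨q, List.mem_cons_of_mem _ hq, h0, he⟩

-- one outer-loop step of A turns the entry contributions for (c :: cs) into those for cs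
lemma pvStep_max_eq (c : Int) (cs : List Int) (d : PySem.Dict Int Int)
    (hnd : d.keys.Nodup) (hne : d.items ≠ []) :
    PySem.List.max? ((d.items.foldl (pvStepA c) d).items.map (pvContrib cs)) (fun x => x)
      = PySem.List.max? (d.items.map (pvContrib (c :: cs))) (fun x => x) := by
  have hne2 : (d.items.foldl (pvStepA c) d).items ≠ [] := pvFoldA_ne_nil c d.items d hne
  cases h1 : PySem.List.max? ((d.items.foldl (pvStepA c) d).items.map (pvContrib cs)) (fun x => x) with
  | none =>
    exact absurd (List.map_eq_nil_iff.mp ((PySem.List.max?_eq_none_iff _ _).mp h1)) hne2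
  | some m1 =>
  cases h2 : PySem.List.max? (d.items.map (pvContrib (c :: cs))) (fun x => x) with
  | none =>
    exact absurd (List.map_eq_nil_iff.mp ((PySem.List.max?_eq_none_iff _ _).mp h2)) hne
  | some m2 =>
  congr 1
  -- m1 ≤ m2
  have hm1 : m1 ≤ m2 := by
    obtain ⟨e, he, hce⟩ := List.mem_map.mp (PySem.List.max?_mem h1)
    rcases pvFoldA_mem c d.items d e he with hmem | ⟨pc, hpc, h0, heq⟩
    · have := PySem.List.max?_isMax h2 (pvContrib (c :: cs) e) (List.mem_map_of_mem hmem)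
      have hb : pvContrib cs e ≤ pvContrib (c :: cs) e := by
        unfold pvContrib; have := pvBest_le_cons e.1 c cs; omega
      simp only at this; omega
    · have := PySem.List.max?_isMax h2 (pvContrib (c :: cs) pc) (List.mem_map_of_mem hpc)
      have hb : pvContrib cs e ≤ pvContrib (c :: cs) pc := by
        unfold pvContrib
        rw [heq]
        have := pvBest_take_le pc.1 c cs h0
        simp only
        omega
      simp only at this; omega
  -- m2 ≤ m1
  have hm2 : m2 ≤ m1 := by
    obtain ⟨e0, he0, hce0⟩ := List.mem_map.mp (PySem.List.max?_mem h2)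
    -- skip bound: the key e0.1 survives with a value ≥ e0.2
    have hskip : e0.2 + pvBest e0.1 cs ≤ m1 := by
      have hget : d.get? e0.1 = some e0.2 := PySem.Dict.get?_of_mem_items d he0 hnd
      obtain ⟨v', hv', hget'⟩ := pvFoldA_get_mono c d.items d e0.1 e0.2 hget
      have hmem' : (e0.1, v') ∈ (d.items.foldl (pvStepA c) d).items :=
        PySem.Dict.mem_items_of_get?_eq_some _ hget'
      have := PySem.List.max?_isMax h1 (pvContrib cs (e0.1, v')) (List.mem_map_of_mem hmem')
      unfold pvContrib at this; simp only at this; omega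
    by_cases h0 : 0 ≤ e0.1 + c
    · -- take bound: the key e0.1 + c holds a value ≥ e0.2 + 1
      have htake : e0.2 + 1 + pvBest (e0.1 + c) cs ≤ m1 := by
        obtain ⟨v', hv', hget'⟩ := pvFoldA_get_after c d.items d e0 he0 h0
        have hmem' : (e0.1 + c, v') ∈ (d.items.foldl (pvStepA c) d).items :=
          PySem.Dict.mem_items_of_get?_eq_some _ hget'
        have := PySem.List.max?_isMax h1 (pvContrib cs (e0.1 + c, v')) (List.mem_map_of_mem hmem')
        unfold pvContrib at this; simp only at this; omega
      rw [← hce0]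
      unfold pvContrib
      rw [pvBest_cons, if_pos h0]
      rcases le_total (pvBest e0.1 cs) (1 + pvBest (e0.1 + c) cs) with hc | hc
      · rw [max_eq_right hc]; omega
      · rw [max_eq_left hc]; omega
    · rw [← hce0]
      unfold pvContrib
      rw [pvBest_cons, if_neg h0]
      exact hskip
  omega

lemma pvLoop_eq (cards : List Int) :
    ∀ d : PySem.Dict Int Int, d.keys.Nodup → d.items ≠ [] →
      PySem.List.max? (cards.foldl (fun dp c => dp.items.foldl (pvStepA c) dp) d).values (fun x => x)
        = PySem.List.max? (d.items.map (pvContrib cards)) (fun x => x) := by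
  induction cards with
  | nil =>
    intro d _ _
    simp only [List.foldl_nil, PySem.Dict.values]
    congr 1
    apply List.map_congr_left
    intro pc _
    simp [pvContrib, pvBest]
  | cons c cs ih =>
    intro d hnd hne
    rw [List.foldl_cons]
    rw [ih (d.items.foldl (pvStepA c) d) (pvFoldA_nodup c d.items d hnd) (pvFoldA_ne_nil c d.items d hne)]
    exact pvStep_max_eq c cs d hnd hne

-- ===== VERDICT (by name: the statement is the Claim_ definition above) =====
theorem maxCardCount_spec : Claim_equal_maxCardCount := by
  intro n card _
  unfold Spec_maxCardCount maxCardCount maxCardCount_alt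
  dsimp only
  have h := pvLoop_eq card (PySem.Dict.ofList [((0 : Int), (0 : Int))]) (by decide) (by decide)
  rw [h]
  have hitems : (PySem.Dict.ofList [((0 : Int), (0 : Int))]).items = [((0 : Int), (0 : Int))] := by decide
  rw [hitems, List.map_cons, List.map_nil, PySem.List.max?_id_cons]
  simp [pvContrib]
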